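-- pv_equiv track=rewrite | github.com/zhichul/dblm | src/dblm/core/modeling/utils.py | map_21
-- ===== SOURCE A (Python) =====
-- def map_21(size1, size2, shared:dict[int, int]):
--         """For two models with size1 and size2 variables each, and
--         shared variables mapping from model2 to model1 index, this
--         function returns a map that maps any index from the second model
--         to that of the combined model, where the combination is the
--         variables of the first model, followed by variables of the
--         second model that are not shared.
--         """
--         v2_to_v1 = dict()
--         next_node_id = size1
--         for i in range(size2):
--             if i not in shared:
--                 v2_to_v1[i] = next_node_id
--                 next_node_id += 1
--             else:
--                 v2_to_v1[i] = shared[i]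
--         return v2_to_v1
-- ===== SOURCE B (Python) =====
-- def map_21(size1, size2, shared):
--     # Rank-based closed form: the combined id of a non-shared index i is
--     # size1 + i - (#shared keys below i), read off a prefix-count table.
--     hit = [i in shared for i in range(size2)]
--     pref = [0]
--     for h in hit:
--         pref.append(pref[-1] + h)
--     return {i: shared[i] if hit[i] else size1 + i - pref[i] for i in range(size2)}
-- ===== Notes on version B (the rewrite author's own statement) =====
-- stated objective: alternative
-- what changed: Instead of threading a next_node_id counter through one stateful loop, B tabulates a prefix count of shared keys and computes each non-shared index's combined id by the closed-form rank formula size1 + i - pref[i].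
import Mathlib
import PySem

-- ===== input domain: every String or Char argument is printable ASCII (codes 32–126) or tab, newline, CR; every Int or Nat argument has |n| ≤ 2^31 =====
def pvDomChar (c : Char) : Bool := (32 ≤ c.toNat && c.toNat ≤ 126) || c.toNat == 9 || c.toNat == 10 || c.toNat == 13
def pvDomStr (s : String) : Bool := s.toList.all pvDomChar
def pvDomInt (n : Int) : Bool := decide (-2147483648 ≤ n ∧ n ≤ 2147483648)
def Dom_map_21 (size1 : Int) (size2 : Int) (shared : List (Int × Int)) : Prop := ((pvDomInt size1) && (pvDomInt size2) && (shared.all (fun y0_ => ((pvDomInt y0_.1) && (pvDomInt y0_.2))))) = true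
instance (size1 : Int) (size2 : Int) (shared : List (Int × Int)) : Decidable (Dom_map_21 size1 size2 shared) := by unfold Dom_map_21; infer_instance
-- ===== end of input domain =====

-- B replaces A's stateful next_node_id loop by a tabulated prefix count of shared keys and
-- the closed-form rank formula size1 + i - pref[i]; alternative decomposition, same cost.

-- ===== PORT A =====
-- A: one loop over range(size2), threading (dict, next_node_id).
def map_21 (size1 : Int) (size2 : Int) (shared : List (Int × Int)) : List (Int × Int) :=
  ((PySem.List.pyRange 0 size2 1).foldl
    (fun (st : PySem.Dict Int Int × Int) i =>
      match List.lookup i shared with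
      | none   => (st.1.insert i st.2, st.2 + 1)
      | some v => (st.1.insert i v, st.2))
    (PySem.Dict.empty, size1)).1.items

-- ===== PORT B =====
-- B: hit mask, prefix-count table pref (appended left to right, reading pref[-1]),
-- then one dict comprehension using the rank formula size1 + i - pref[i].
def map_21_alt (size1 : Int) (size2 : Int) (shared : List (Int × Int)) : List (Int × Int) :=
  let rng := PySem.List.pyRange 0 size2 1
  let hit : List Bool := rng.map (fun i => (List.lookup i shared).isSome)
  let pref : List Int := hit.foldl
      (fun p h => p ++ [PySem.List.pyGetD p (-1) 0 + (if h then 1 else 0)]) [0]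
  (rng.foldl
    (fun (d : PySem.Dict Int Int) i =>
      d.insert i (if PySem.List.pyGetD hit i false then (List.lookup i shared).getD 0
                  else size1 + i - PySem.List.pyGetD pref i 0))
    PySem.Dict.empty).items

-- ===== PRECONDITION & SPEC =====
def Spec_map_21 (size1 : Int) (size2 : Int) (shared : List (Int × Int)) (out : List (Int × Int)) : Prop := out = map_21_alt size1 size2 shared
instance (size1 : Int) (size2 : Int) (shared : List (Int × Int)) (out : List (Int × Int)) : Decidable (Spec_map_21 size1 size2 shared out) := by unfold Spec_map_21; infer_instance

-- ===== CLAIM (what is proved, stated in full; the proofs are below) =====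
def Claim_equal_map_21 : Prop := ∀ (size1 : Int) (size2 : Int) (shared : List (Int × Int)), Dom_map_21 size1 size2 shared → Spec_map_21 size1 size2 shared (map_21 size1 size2 shared)

-- ===== LEMMAS AND PROOFS =====

-- A's loop over a Nodup list of fresh keys appends one item per index, numbering the
-- non-shared ones c, c+1, …, i.e. c + (position of i among the non-shared elements of l).
theorem mapA_fold_items (shared : List (Int × Int)) (l : List Int) (hl : l.Nodup)
    (d : PySem.Dict Int Int) (c : Int) (hfresh : ∀ i ∈ l, d.contains i = false) :
    (l.foldl
      (fun (st : PySem.Dict Int Int × Int) i =>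
        match List.lookup i shared with
        | none   => (st.1.insert i st.2, st.2 + 1)
        | some v => (st.1.insert i v, st.2))
      (d, c)).1.items
    = d.items ++ l.map (fun i =>
        (i, match List.lookup i shared with
            | some v => v
            | none   => c + (List.idxOf i (l.filter (fun j => (List.lookup j shared).isNone)) : Int))) := by
  induction l generalizing d c with
  | nil => simp
  | cons a t ih =>
    obtain ⟨ha, ht⟩ := List.nodup_cons.mp hl
    have hfa : d.contains a = false := hfresh a (by simp)
    have hfresh' : ∀ (dv : Int), ∀ i ∈ t, ((d.insert a dv).contains i) = false := by
      intro dv i hi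
      rw [PySem.Dict.contains_insert]
      have : (i == a) = false := by simp; rintro rfl; exact ha hi
      simp [this, hfresh i (List.mem_cons_of_mem _ hi)]
    cases hcase : List.lookup a shared with
    | none =>
      simp only [List.foldl_cons, hcase]
      rw [ih ht (d.insert a c) (c + 1) (hfresh' c)]
      rw [PySem.Dict.items_insert_of_not_contains _ _ hfa]
      simp only [List.map_cons, List.filter_cons, hcase, Option.isNone_none,
        List.append_assoc, List.singleton_append]
      refine congrArg _ (List.cons_eq_cons.mpr ⟨by simp [List.idxOf_cons_self], ?_⟩)
      apply List.map_congr_left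
      intro i hi
      have hne : i ≠ a := fun h => ha (h ▸ hi)
      cases h2 : List.lookup i shared with
      | none =>
        simp only [if_true, List.idxOf_cons_ne _ (Ne.symm hne), Prod.mk.injEq, true_and]
        push_cast; ring
      | some v => simp
    | some v =>
      simp only [List.foldl_cons, hcase]
      rw [ih ht (d.insert a v) c (hfresh' v)]
      rw [PySem.Dict.items_insert_of_not_contains _ _ hfa]
      simp only [List.map_cons, List.filter_cons, hcase, List.append_assoc, List.singleton_append]
      simp

-- B's pref loop, appending pref[-1] + h, is List.scanl of (+ hit) from the seed.
theorem pref_fold_scanl (hs : List Bool) (q : List Int) (a : Int) :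
    hs.foldl (fun p h => p ++ [PySem.List.pyGetD p (-1) 0 + (if h then 1 else 0)]) (q ++ [a])
    = q ++ List.scanl (fun acc h => acc + (if h then 1 else 0)) a hs := by
  induction hs generalizing q a with
  | nil => simp
  | cons h t ih =>
    simp only [List.foldl_cons, List.scanl_cons]
    rw [PySem.List.pyGetD_neg_one_append_singleton]
    have := ih (q ++ [a]) (a + (if h then 1 else 0))
    simpa [List.append_assoc] using this

-- Indexing the scanl: entry k is the seed plus the count of trues among the first k flags.
theorem scanl_count (hs : List Bool) (a : Int) (k : Nat) (hk : k ≤ hs.length) :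
    (List.scanl (fun acc h => acc + (if h then 1 else 0)) a hs).getD k 0
    = a + ((hs.take k).countP id : Int) := by
  induction hs generalizing a k with
  | nil =>
    have hk0 : k = 0 := Nat.le_zero.mp (by simpa using hk)
    subst hk0; simp
  | cons h t ih =>
    cases k with
    | zero => simp
    | succ k =>
      simp only [List.scanl_cons, List.take_succ_cons, List.countP_cons, List.getD_cons_succ]
      rw [ih (a + (if h then 1 else 0)) k (by simpa using hk)]
      by_cases h' : h = true
      · simp [h']; ring
      · simp [h']

-- ===== VERDICT (by name: the statement is the Claim_ definition above) =====
theorem map_21_spec : Claim_equal_map_21 := by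
  intro size1 size2 shared _
  unfold Spec_map_21 map_21 map_21_alt
  simp only []
  set rng := PySem.List.pyRange 0 size2 1 with hrng
  set hit : List Bool := rng.map (fun i => (List.lookup i shared).isSome) with hhit
  set pref : List Int := hit.foldl
      (fun p h => p ++ [PySem.List.pyGetD p (-1) 0 + (if h then 1 else 0)]) [0] with hpref
  have hnd : rng.Nodup := PySem.List.nodup_pyRange_one 0 size2
  have hB : ((rng.foldl
      (fun (d : PySem.Dict Int Int) i =>
        d.insert i (if PySem.List.pyGetD hit i false then (List.lookup i shared).getD 0
                    else size1 + i - PySem.List.pyGetD pref i 0))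
      PySem.Dict.empty).items)
      = PySem.Dict.empty.items ++ rng.map (fun i =>
          (i, if PySem.List.pyGetD hit i false then (List.lookup i shared).getD 0
              else size1 + i - PySem.List.pyGetD pref i 0)) := by
    apply PySem.Dict.items_foldl_insert_fresh
    · intro a _; exact PySem.Dict.contains_empty _
    · simpa using hnd
  rw [hB, mapA_fold_items shared _ hnd PySem.Dict.empty size1
        (fun i _ => PySem.Dict.contains_empty _)]
  congr 1
  apply List.map_congr_left
  intro i hi
  have hib : 0 ≤ i ∧ i < size2 := (PySem.List.mem_pyRange_one).mp (hrng ▸ hi)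
  -- hit[i] reads the membership flag of i
  have hhiti : PySem.List.pyGetD hit i false = (List.lookup i shared).isSome := by
    rw [hhit, hrng]
    exact PySem.List.pyGetD_map_pyRange_of_nonneg _ _ _ _ hib.1 hib.2
  -- pref = scanl, and pref[i] counts the shared keys below i
  have hlen : hit.length = (size2 - 0).toNat := by
    simp [hhit, hrng, PySem.List.length_pyRange_one]
  have hpref_scanl : pref = List.scanl (fun acc h => acc + (if h then 1 else 0)) 0 hit := by
    rw [hpref]
    simpa using pref_fold_scanl hit [] 0
  have hkle : i.toNat ≤ hit.length := by rw [hlen]; omega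
  have hprefi : PySem.List.pyGetD pref i 0
      = ((hit.take i.toNat).countP id : Int) := by
    have hlt : i.toNat < pref.length := by
      rw [hpref_scanl]; simp [List.length_scanl]; omega
    rw [PySem.List.pyGetD_eq_getElem pref 0 hib.1 (by omega)]
    rw [← List.getD_eq_getElem pref 0 hlt, hpref_scanl]
    simpa using scanl_count hit 0 i.toNat hkle
  -- split the range at i
  have hsplit : rng = PySem.List.pyRange 0 i 1 ++ PySem.List.pyRange i size2 1 :=
    PySem.List.pyRange_one_append 0 i size2 hib.1 (le_of_lt hib.2)
  have htake : hit.take i.toNat = (PySem.List.pyRange 0 i 1).map (fun j => (List.lookup j shared).isSome) := by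
    rw [hhit, hsplit, List.map_append, List.take_append_of_le_length, List.take_of_length_le]
    · simp [PySem.List.length_pyRange_one]
    · simp [PySem.List.length_pyRange_one]
  cases h2 : List.lookup i shared with
  | some v => simp [hhiti, h2]
  | none =>
    have hcons : PySem.List.pyRange i size2 1 = i :: PySem.List.pyRange (i+1) size2 1 :=
      PySem.List.pyRange_one_cons hib.2
    simp only [hhiti, h2, Option.isSome_none, Bool.false_eq_true, if_false]
    -- A's idxOf into the filtered range = count of non-shared below i
    have hidx : List.idxOf i (rng.filter (fun j => (List.lookup j shared).isNone))
        = ((PySem.List.pyRange 0 i 1).filter (fun j => (List.lookup j shared).isNone)).length := by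
      rw [hsplit, hcons, List.filter_append, List.filter_cons]
      simp only [h2, Option.isNone_none, if_true]
      rw [List.idxOf_append_of_notMem, List.idxOf_cons_self, Nat.add_zero]
      intro hmem
      have := (PySem.List.mem_pyRange_one).mp (List.mem_of_mem_filter hmem)
      omega
    have hlenlow : (PySem.List.pyRange 0 i 1).length = i.toNat := by
      simp [PySem.List.length_pyRange_one]
    have hcount : ((PySem.List.pyRange 0 i 1).filter (fun j => (List.lookup j shared).isNone)).length
        + (hit.take i.toNat).countP id = i.toNat := by
      rw [htake, List.countP_map]
      rw [← List.countP_eq_length_filter, ← hlenlow, List.length_eq_countP_add_countP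
        (p := fun j => (List.lookup j shared).isNone)]
      congr 1
      apply List.countP_congr
      intro j _
      simp [Function.comp, Option.isNone_iff_eq_none, Option.isSome_iff_ne_none]
    rw [hidx, hprefi]
    simp only [Prod.mk.injEq, true_and]
    have hc' : (((PySem.List.pyRange 0 i 1).filter (fun j => (List.lookup j shared).isNone)).length : Int)
        + ((hit.take i.toNat).countP id : Int) = i := by
      have hcast := congrArg (fun n : Nat => (n : Int)) hcount
      push_cast at hcast
      rwa [Int.toNat_of_nonneg hib.1] at hcast
    linarith
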